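-- pv_equiv track=rewrite | github.com/mshafqats/HackerEarth | Data Structure/Arrays/1-D/Speed.py | solve
-- ===== SOURCE A (Python) =====
-- def solve(cars: list):
--     previous = float('inf')
--     fullspeed = 0
--     for car in cars:
--         if car <= previous:
--             fullspeed += 1
--             previous = car
--     return fullspeed
-- ===== SOURCE B (Python) =====
-- def solve(cars: list):
--     # brute force: a car drives at full speed iff it is no faster than every car ahead of it
--     return sum(1 for i, c in enumerate(cars) if all(c <= x for x in cars[:i]))
-- ===== Notes on version B (the rewrite author's own statement) =====
-- stated objective: alternative
-- what changed: Replaced A's single pass maintaining a running minimum with a per-element brute-force check: each car is counted iff it is <= every car ahead of it (quadratic nested scans, no maintained state).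
import Mathlib
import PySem

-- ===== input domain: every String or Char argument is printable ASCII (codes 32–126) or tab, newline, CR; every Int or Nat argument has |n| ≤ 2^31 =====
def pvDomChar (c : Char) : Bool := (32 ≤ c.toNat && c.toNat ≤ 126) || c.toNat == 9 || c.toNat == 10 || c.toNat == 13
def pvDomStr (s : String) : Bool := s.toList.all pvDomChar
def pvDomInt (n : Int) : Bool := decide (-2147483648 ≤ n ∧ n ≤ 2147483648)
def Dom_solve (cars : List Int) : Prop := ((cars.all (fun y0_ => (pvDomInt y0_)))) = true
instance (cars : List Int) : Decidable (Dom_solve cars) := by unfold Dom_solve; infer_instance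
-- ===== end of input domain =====

-- B replaces A's running-minimum pass by a brute-force per-element check against all predecessors (alternative decomposition, quadratic).

-- ===== PORT A =====
-- previous = float('inf') is modelled as `none` (no int exceeds it); once set it is `some p`.
def solveLoop : List Int → Option Int → Int → Int
  | [], _, fullspeed => fullspeed
  | car :: cars, previous, fullspeed =>
    if (match previous with | none => true | some p => car ≤ p) then
      solveLoop cars (some car) (fullspeed + 1)
    else
      solveLoop cars previous fullspeed

def solve (cars : List Int) : Int := solveLoop cars none 0

-- ===== PORT B =====
-- sum(1 for i, c in enumerate(cars) if all(c <= x for x in cars[:i]))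
def solve_alt (cars : List Int) : Int :=
  ((cars.zipIdx.countP (fun p => (cars.take p.2).all (fun x => p.1 ≤ x))) : Int)

-- ===== PRECONDITION & SPEC =====
def Spec_solve (cars : List Int) (out : Int) : Prop := out = solve_alt cars
instance (cars : List Int) (out : Int) : Decidable (Spec_solve cars out) := by unfold Spec_solve; infer_instance

-- ===== CLAIM (what is proved, stated in full; the proofs are below) =====
def Claim_equal_solve : Prop := ∀ (cars : List Int), Dom_solve cars → Spec_solve cars (solve cars)

-- ===== LEMMAS AND PROOFS =====
-- brute count with an explicit prefix accumulator; both ports are reduced to it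
def bc (pre : List Int) : List Int → Nat
  | [] => 0
  | c :: cs => (if pre.all (fun x => c ≤ x) then 1 else 0) + bc (pre ++ [c]) cs

theorem solveLoop_bc (cs : List Int) : ∀ (pre : List Int) (p : Int) (acc : Int),
    (∀ x ∈ pre, p ≤ x) → p ∈ pre →
    solveLoop cs (some p) acc = acc + (bc pre cs : Int) := by
  induction cs with
  | nil => intro pre p acc _ _; simp [solveLoop, bc]
  | cons c cs ih =>
    intro pre p acc hall hmem
    by_cases h : c ≤ p
    · have hallc : pre.all (fun x => c ≤ x) = true := by
        simp only [List.all_eq_true, decide_eq_true_eq]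
        intro x hx; exact le_trans h (hall x hx)
      have := ih (pre ++ [c]) c (acc + 1)
        (by intro x hx; rcases List.mem_append.mp hx with hx | hx
            · exact le_trans h (hall x hx)
            · simp at hx; omega)
        (by simp)
      simp [solveLoop, h, bc, hallc, this]; omega
    · have hallc : pre.all (fun x => c ≤ x) = false := by
        simp only [List.all_eq_false]
        exact ⟨p, hmem, by simp; omega⟩
      have := ih (pre ++ [c]) p acc
        (by intro x hx; rcases List.mem_append.mp hx with hx | hx
            · exact hall x hx
            · simp at hx; omega)
        (List.mem_append.mpr (Or.inl hmem))
      simp [solveLoop, h, bc, hallc, this]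

theorem countP_bc (cs : List Int) : ∀ (pre : List Int),
    ((cs.zipIdx pre.length).countP (fun p => ((pre ++ cs).take p.2).all (fun x => p.1 ≤ x))) = bc pre cs := by
  induction cs with
  | nil => intro pre; simp [bc]
  | cons c cs ih =>
    intro pre
    have htake : ((pre ++ c :: cs).take pre.length) = pre := by
      rw [List.take_append_of_le_length (le_refl _), List.take_length]
    have hassoc : pre ++ c :: cs = (pre ++ [c]) ++ cs := by simp
    have hlen : pre.length + 1 = (pre ++ [c]).length := by simp
    rw [List.zipIdx_cons, List.countP_cons]
    simp only [htake]
    rw [hassoc, hlen, ih (pre ++ [c]), bc]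
    by_cases h : (pre.all (fun x => c ≤ x)) = true <;> simp [h] <;> omega

theorem solve_eq_bc (cars : List Int) : solve cars = (bc [] cars : Int) := by
  cases cars with
  | nil => rfl
  | cons c cs =>
    have : solveLoop cs (some c) 1 = 1 + (bc [c] cs : Int) :=
      solveLoop_bc cs [c] c 1 (by simp) (by simp)
    simp [solve, solveLoop, this, bc]

theorem solve_alt_eq_bc (cars : List Int) : solve_alt cars = (bc [] cars : Int) := by
  have := countP_bc cars []
  simp only [List.nil_append, List.length_nil] at this
  simp [solve_alt, this]

-- ===== VERDICT (by name: the statement is the Claim_ definition above) =====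
theorem solve_spec : Claim_equal_solve := by
  intro cars _
  unfold Spec_solve
  rw [solve_eq_bc, solve_alt_eq_bc]
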